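-- pv_equiv track=rewrite | github.com/ThiagoVilani/PyL1 | Clase 10/funciones.py | Buscar_minimo_maximo_fuerza
-- ===== SOURCE A (Python) =====
-- def Buscar_minimo_maximo_fuerza(min_max:str, lista:list):
--     """
--     Encuentra el valor minimo o maximo de una lista\n
--     Espera que los parametros sean: la palabra minimo o maximo segun la decision del usuario\n
--     El segundo parametro esperado es una lista
--     """
--     minimo_maximo = 0
--     for i in range(len(lista)):
--         if min_max == "asc":
--             if lista[i]["fuerza"] < lista[minimo_maximo]["fuerza"]:
--                 minimo_maximo = i
--         elif min_max == "desc":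
--             if lista[i]["fuerza"] > lista[minimo_maximo]["fuerza"]:
--                 minimo_maximo = i
--     return minimo_maximo
-- ===== SOURCE B (Python) =====
-- def Buscar_minimo_maximo_fuerza(min_max: str, lista: list):
--     """Staged: extract the 'fuerza' values, compute the extremal value, locate its first index."""
--     if min_max not in ("asc", "desc"):
--         return 0
--     fuerzas = [d["fuerza"] for d in lista]
--     if not fuerzas:
--         return 0
--     objetivo = min(fuerzas) if min_max == "asc" else max(fuerzas)
--     return fuerzas.index(objetivo)
-- ===== Notes on version B (the rewrite author's own statement) =====
-- stated objective: alternative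
-- what changed: A tracks the best index inside one accumulator scan over positions; B works in staged passes over values: it extracts the 'fuerza' column, computes the extremal value with min/max, and then locates that value's first index with list.index, so no best-so-far index is ever maintained.
import Mathlib
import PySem

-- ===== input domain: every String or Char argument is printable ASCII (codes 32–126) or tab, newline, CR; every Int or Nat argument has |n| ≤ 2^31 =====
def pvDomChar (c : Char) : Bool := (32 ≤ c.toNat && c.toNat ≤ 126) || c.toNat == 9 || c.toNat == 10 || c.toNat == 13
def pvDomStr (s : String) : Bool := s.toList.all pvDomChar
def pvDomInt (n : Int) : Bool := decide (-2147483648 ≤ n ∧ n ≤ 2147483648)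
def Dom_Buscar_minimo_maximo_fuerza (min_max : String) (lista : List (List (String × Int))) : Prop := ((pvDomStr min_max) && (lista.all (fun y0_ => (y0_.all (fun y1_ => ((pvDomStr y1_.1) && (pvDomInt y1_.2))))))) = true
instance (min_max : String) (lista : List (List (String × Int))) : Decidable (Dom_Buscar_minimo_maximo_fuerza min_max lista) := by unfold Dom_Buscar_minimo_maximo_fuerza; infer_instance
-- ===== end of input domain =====

-- B replaces A's best-index accumulator scan by staged passes: extract the 'fuerza'
-- values, compute the extremal value (min/max), then locate its first index. (objective: alternative)


-- ===== PORT A =====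
-- d["fuerza"] on an association list: first match; the `.getD 0` default is never
-- reached on inputs admitted by Pre_ (the key is present there).
def pvFuerza (d : List (String × Int)) : Int :=
  ((d.find? (fun p => p.1 == "fuerza")).map Prod.snd).getD 0

def Buscar_minimo_maximo_fuerza (min_max : String) (lista : List (List (String × Int))) : Int :=
  (PySem.List.pyRange 0 (lista.length : Int) 1).foldl
    (fun minimo_maximo i =>
      if min_max = "asc" then
        if pvFuerza (PySem.List.pyGetD lista i []) < pvFuerza (PySem.List.pyGetD lista minimo_maximo []) then i
        else minimo_maximo
      else if min_max = "desc" then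
        if pvFuerza (PySem.List.pyGetD lista i []) > pvFuerza (PySem.List.pyGetD lista minimo_maximo []) then i
        else minimo_maximo
      else minimo_maximo) 0

-- ===== PORT B =====
def Buscar_minimo_maximo_fuerza_alt (min_max : String) (lista : List (List (String × Int))) : Int :=
  if min_max ≠ "asc" ∧ min_max ≠ "desc" then 0
  else
    let fuerzas := lista.map pvFuerza
    if fuerzas = [] then 0
    else
      match (if min_max = "asc" then PySem.List.min? fuerzas (fun x => x)
             else PySem.List.max? fuerzas (fun x => x)) with
      | some objetivo =>
          match PySem.List.index? fuerzas objetivo with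
          | some k => (k : Int)
          | none => 0   -- unreachable: the extremal value is in the list
      | none => 0       -- unreachable: fuerzas ≠ [] here

-- ===== PRECONDITION & SPEC =====
-- Pre_ excludes exactly the inputs where Python A raises KeyError: min_max "asc"/"desc"
-- with some list element lacking the key "fuerza" (B raises there too).
def Pre_Buscar_minimo_maximo_fuerza (min_max : String) (lista : List (List (String × Int))) : Prop :=
  (min_max = "asc" ∨ min_max = "desc") → ∀ d ∈ lista, "fuerza" ∈ d.map Prod.fst
instance (min_max : String) (lista : List (List (String × Int))) : Decidable (Pre_Buscar_minimo_maximo_fuerza min_max lista) := by unfold Pre_Buscar_minimo_maximo_fuerza; infer_instance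

def pvWitness_Buscar_minimo_maximo_fuerza : String × (List (List (String × Int))) :=
  ("asc", [[("fuerza", 3)], [("fuerza", 1)], [("fuerza", 1)]])

def Spec_Buscar_minimo_maximo_fuerza (min_max : String) (lista : List (List (String × Int))) (out : Int) : Prop := out = Buscar_minimo_maximo_fuerza_alt min_max lista
instance (min_max : String) (lista : List (List (String × Int))) (out : Int) : Decidable (Spec_Buscar_minimo_maximo_fuerza min_max lista out) := by unfold Spec_Buscar_minimo_maximo_fuerza; infer_instance

-- ===== CLAIM =====
def Claim_equal_Buscar_minimo_maximo_fuerza : Prop := ∀ (min_max : String) (lista : List (List (String × Int))), Dom_Buscar_minimo_maximo_fuerza min_max lista → Pre_Buscar_minimo_maximo_fuerza min_max lista → Spec_Buscar_minimo_maximo_fuerza min_max lista (Buscar_minimo_maximo_fuerza min_max lista)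

-- ===== LEMMAS AND PROOFS =====

theorem pvWitness_ok :
    Dom_Buscar_minimo_maximo_fuerza pvWitness_Buscar_minimo_maximo_fuerza.1 pvWitness_Buscar_minimo_maximo_fuerza.2 ∧
    Pre_Buscar_minimo_maximo_fuerza pvWitness_Buscar_minimo_maximo_fuerza.1 pvWitness_Buscar_minimo_maximo_fuerza.2 := by
  decide

-- A's accumulator scan, restated over the list of values with Nat positions.
def pvScan (c : Int → Int → Bool) : List Int → Nat → Nat → Int → Nat
  | [], _, bi, _ => bi
  | x :: xs, i, bi, bv => if c x bv then pvScan c xs (i+1) i x else pvScan c xs (i+1) bi bv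

-- "j is the first c-extremal position of vs": every earlier value is beaten, no value beats vs[j].
def isFirstArg (c : Int → Int → Bool) (vs : List Int) (j : Nat) : Prop :=
  j < vs.length ∧ (∀ i, i < j → c (vs.getD j 0) (vs.getD i 0)) ∧
    (∀ i, j ≤ i → i < vs.length → ¬ c (vs.getD i 0) (vs.getD j 0))

theorem firstArg_unique (c : Int → Int → Bool) (vs : List Int) (j1 j2 : Nat)
    (h1 : isFirstArg c vs j1) (h2 : isFirstArg c vs j2) : j1 = j2 := by
  obtain ⟨hl1, hf1, ha1⟩ := h1
  obtain ⟨hl2, hf2, ha2⟩ := h2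
  rcases lt_trichotomy j1 j2 with h | h | h
  · exact absurd (hf2 j1 h) (ha1 j2 (Nat.le_of_lt h) hl2)
  · exact h
  · exact absurd (hf1 j2 h) (ha2 j1 (Nat.le_of_lt h) hl1)

theorem pvScan_spec (c : Int → Int → Bool)
    (hc : ∀ x y z : Int, c x y → ¬ c z y → c x z)
    (hasym : ∀ x y : Int, c x y → ¬ c y x) :
    ∀ (xs vs : List Int) (a bi : Nat), vs.drop a = xs → bi < a → a ≤ vs.length →
    (∀ i, i < bi → c (vs.getD bi 0) (vs.getD i 0)) →
    (∀ i, bi ≤ i → i < a → ¬ c (vs.getD i 0) (vs.getD bi 0)) →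
    isFirstArg c vs (pvScan c xs a bi (vs.getD bi 0)) := by
  intro xs
  induction xs with
  | nil =>
    intro vs a bi hdrop hba hal hf hrest
    have hlen : vs.length ≤ a := List.drop_eq_nil_iff.mp hdrop
    have ha : a = vs.length := Nat.le_antisymm hal hlen
    subst ha
    exact ⟨Nat.lt_of_lt_of_le hba hal, hf, hrest⟩
  | cons x xs ih =>
    intro vs a bi hdrop hba hal hf hrest
    have halt : a < vs.length := by
      by_contra hge
      rw [List.drop_eq_nil_iff.mpr (Nat.le_of_not_lt hge)] at hdrop
      exact absurd hdrop.symm (List.cons_ne_nil x xs)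
    have hx : vs.getD a 0 = x ∧ vs.drop (a+1) = xs := by
      rw [List.drop_eq_getElem_cons halt] at hdrop
      injection hdrop with h1 h2
      exact ⟨by rw [List.getD_eq_getElem vs 0 halt]; exact h1, h2⟩
    simp only [pvScan]
    by_cases hcx : c x (vs.getD bi 0)
    · rw [if_pos hcx]
      have := ih vs (a+1) a hx.2 (Nat.lt_succ_self a) halt
        (fun i hia => by
          rw [hx.1]
          by_cases hib : i < bi
          · exact hc x (vs.getD bi 0) (vs.getD i 0) hcx (hasym _ _ (hf i hib))
          · exact hc x (vs.getD bi 0) (vs.getD i 0) hcx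
              (hrest i (Nat.le_of_not_lt hib) hia))
        (fun i hai hia1 => by
          have : i = a := Nat.le_antisymm (Nat.lt_succ_iff.mp hia1) hai
          subst this
          rw [hx.1]
          exact fun hxx => hasym x x hxx hxx)
      rwa [hx.1] at this
    · rw [if_neg hcx]
      exact ih vs (a+1) bi hx.2 (Nat.lt_succ_of_lt hba) halt hf
        (fun i hbi hia1 => by
          by_cases hia : i < a
          · exact hrest i hbi hia
          · have : i = a := Nat.le_antisymm (Nat.lt_succ_iff.mp hia1) (Nat.le_of_not_lt hia)
            subst this
            rw [hx.1]
            exact hcx)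

-- A's Int-indexed foldl over the range equals pvScan over the values suffix.
theorem fold_eq_scan (c : Int → Int → Bool) (vs : List Int) :
    ∀ (xs : List Int) (a bi : Nat), vs.drop a = xs → a ≤ vs.length →
    (PySem.List.pyRange (a : Int) (vs.length : Int) 1).foldl
      (fun acc i => if c (PySem.List.pyGetD vs i 0) (PySem.List.pyGetD vs acc 0) then i else acc) (bi : Int)
    = (pvScan c xs a bi (vs.getD bi 0) : Int) := by
  intro xs
  induction xs with
  | nil =>
    intro a bi hdrop hal
    have hlen : vs.length ≤ a := List.drop_eq_nil_iff.mp hdrop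
    have ha : a = vs.length := Nat.le_antisymm hal hlen
    rw [PySem.List.pyRange_one_eq_nil (by exact_mod_cast Nat.le_of_eq ha.symm)]
    simp [pvScan]
  | cons x xs ih =>
    intro a bi hdrop hal
    have halt : a < vs.length := by
      by_contra hge
      rw [List.drop_eq_nil_iff.mpr (Nat.le_of_not_lt hge)] at hdrop
      exact absurd hdrop.symm (List.cons_ne_nil x xs)
    have hx : vs.getD a 0 = x ∧ vs.drop (a+1) = xs := by
      rw [List.drop_eq_getElem_cons halt] at hdrop
      injection hdrop with h1 h2
      exact ⟨by rw [List.getD_eq_getElem vs 0 halt]; exact h1, h2⟩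
    rw [PySem.List.pyRange_one_cons (by exact_mod_cast halt)]
    simp only [List.foldl_cons, PySem.List.pyGetD_natCast]
    have hcast : ((a : Int) + 1) = ((a + 1 : Nat) : Int) := by push_cast; ring
    by_cases hcx : c (vs.getD a 0) (vs.getD bi 0)
    · rw [if_pos hcx, hcast, ih (a+1) a hx.2 halt]
      simp only [pvScan]
      rw [if_pos (show c x (vs.getD bi 0) from hx.1 ▸ hcx), hx.1]
    · rw [if_neg hcx, hcast, ih (a+1) bi hx.2 halt]
      simp only [pvScan]
      rw [if_neg (show ¬ c x (vs.getD bi 0) from hx.1 ▸ hcx)]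

-- The first index of an extremal value is the first c-extremal position.
theorem index_extremal_firstArg (c : Int → Int → Bool)
    (htot : ∀ x y : Int, x ≠ y → c x y ∨ c y x)
    (vs : List Int) (m : Int) (hext : ∀ y ∈ vs, ¬ c y m) (k : Nat)
    (hidx : PySem.List.index? vs m = some k) : isFirstArg c vs k := by
  obtain ⟨hk, hkm, hbefore⟩ := PySem.List.getElem_of_index?_eq_some hidx
  refine ⟨hk, ?_, ?_⟩
  · intro i hi
    have hil : i < vs.length := Nat.lt_trans hi hk
    rw [List.getD_eq_getElem vs 0 hk, List.getD_eq_getElem vs 0 hil, hkm]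
    have hne : m ≠ vs[i] := fun h => hbefore i hi h.symm
    rcases htot m vs[i] hne with h | h
    · exact h
    · exact absurd h (hext vs[i] (List.getElem_mem hil))
  · intro i hki hil
    rw [List.getD_eq_getElem vs 0 hk, List.getD_eq_getElem vs 0 hil, hkm]
    exact hext vs[i] (List.getElem_mem hil)

theorem pvGetD_map_fuerza (lista : List (List (String × Int))) (i : Int) :
    PySem.List.pyGetD (lista.map pvFuerza) i 0 = pvFuerza (PySem.List.pyGetD lista i []) := by
  have h0 : pvFuerza [] = 0 := by decide
  rw [← h0, PySem.List.pyGetD_map]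

def cLT (x y : Int) : Bool := decide (x < y)
def cGT (x y : Int) : Bool := decide (y < x)

theorem cLT_hc : ∀ x y z : Int, cLT x y → ¬ cLT z y → cLT x z := by
  intro x y z h1 h2; simp only [cLT, decide_eq_true_eq] at *; omega
theorem cLT_hasym : ∀ x y : Int, cLT x y → ¬ cLT y x := by
  intro x y h1; simp only [cLT, decide_eq_true_eq] at *; omega
theorem cLT_htot : ∀ x y : Int, x ≠ y → cLT x y ∨ cLT y x := by
  intro x y h; simp only [cLT, decide_eq_true_eq]; omega
theorem cGT_hc : ∀ x y z : Int, cGT x y → ¬ cGT z y → cGT x z := by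
  intro x y z h1 h2; simp only [cGT, decide_eq_true_eq] at *; omega
theorem cGT_hasym : ∀ x y : Int, cGT x y → ¬ cGT y x := by
  intro x y h1; simp only [cGT, decide_eq_true_eq] at *; omega
theorem cGT_htot : ∀ x y : Int, x ≠ y → cGT x y ∨ cGT y x := by
  intro x y h; simp only [cGT, decide_eq_true_eq]; omega

-- One mode of A's loop, over the values list, equals the first index of the extremal value.
theorem main_branch (c : Int → Int → Bool)
    (hc : ∀ x y z : Int, c x y → ¬ c z y → c x z)
    (hasym : ∀ x y : Int, c x y → ¬ c y x)
    (htot : ∀ x y : Int, x ≠ y → c x y ∨ c y x)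
    (v : Int) (t : List Int) (m : Int)
    (hext : ∀ y ∈ (v :: t), ¬ c y m) (k : Nat)
    (hidx : PySem.List.index? (v :: t) m = some k) :
    (PySem.List.pyRange 0 ((v :: t).length : Int) 1).foldl
      (fun acc i => if c (PySem.List.pyGetD (v :: t) i 0) (PySem.List.pyGetD (v :: t) acc 0) then i else acc) 0
    = (k : Int) := by
  have hirr : ∀ x : Int, ¬ c x x := fun x h => hasym x x h h
  have h0 : (0 : Int) < ((v :: t).length : Int) := by simp
  rw [PySem.List.pyRange_one_cons h0, List.foldl_cons]
  have hfold := fold_eq_scan c (v :: t) t 1 0 (by simp) (by simp)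
  push_cast at hfold
  simp only [PySem.List.pyGetD_zero_cons, List.getD_cons_zero] at hfold ⊢
  rw [if_neg (hirr v), show (0 : Int) + 1 = 1 from rfl, hfold]
  have hscan : isFirstArg c (v :: t) (pvScan c t 1 0 v) := by
    have := pvScan_spec c hc hasym t (v :: t) 1 0 (by simp) Nat.one_pos (by simp)
      (fun i hi => absurd hi (Nat.not_lt_zero i))
      (fun i _ hi1 => by
        have : i = 0 := by omega
        subst this
        simpa using hirr v)
    simpa using this
  have hk : isFirstArg c (v :: t) k := index_extremal_firstArg c htot (v :: t) m hext k hidx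
  exact congrArg Nat.cast (firstArg_unique c (v :: t) _ k hscan hk)

theorem ite_cLT (x y a b : Int) : (if x < y then a else b) = (if cLT x y then a else b) := by
  simp [cLT]
theorem ite_cGT (x y a b : Int) : (if x > y then a else b) = (if cGT x y then a else b) := by
  simp [cGT]

-- ===== VERDICT =====
theorem Buscar_minimo_maximo_fuerza_spec : Claim_equal_Buscar_minimo_maximo_fuerza := by
  intro min_max lista _ _
  unfold Spec_Buscar_minimo_maximo_fuerza
  unfold Buscar_minimo_maximo_fuerza Buscar_minimo_maximo_fuerza_alt
  by_cases hnil : lista = []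
  · subst hnil
    simp [PySem.List.pyRange_one_eq_nil (le_refl (0 : Int))]
  · have hvsne : lista.map pvFuerza ≠ [] := by simpa using hnil
    obtain ⟨v, t, hvt⟩ := List.exists_cons_of_ne_nil hvsne
    have hlen : lista.length = (lista.map pvFuerza).length := by simp
    by_cases ha : min_max = "asc"
    · subst ha
      -- reduce the string comparisons in both ports
      simp only [reduceIte, if_neg hvsne]
      cases hmin : PySem.List.min? (lista.map pvFuerza) (fun x => x) with
      | none => exact absurd ((PySem.List.min?_eq_none_iff _ _).mp hmin) hvsne
      | some m =>
        have hmem : m ∈ lista.map pvFuerza := PySem.List.min?_mem hmin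
        have hsome : (PySem.List.index? (lista.map pvFuerza) m).isSome :=
          (PySem.List.index?_isSome_iff _ _).mpr hmem
        obtain ⟨k, hk⟩ := Option.isSome_iff_exists.mp hsome
        have hext : ∀ y ∈ (v :: t), ¬ cLT y m := by
          intro y hy
          have := PySem.List.min?_isMin hmin y (hvt ▸ hy)
          simp only [cLT, decide_eq_true_eq]
          omega
        -- reduce A to the loop over the values and conclude
        simp only [← pvGetD_map_fuerza, ite_cLT, hlen, hvt]
        have hk' : PySem.List.index? (v :: t) m = some k := hvt ▸ hk
        rw [if_neg (by simp : ¬(("asc" : String) ≠ "asc" ∧ ("asc" : String) ≠ "desc")), hk']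
        exact main_branch cLT cLT_hc cLT_hasym cLT_htot v t m hext k hk'
    · by_cases hd : min_max = "desc"
      · subst hd
        simp only [reduceIte, if_neg hvsne]
        cases hmax : PySem.List.max? (lista.map pvFuerza) (fun x => x) with
        | none => exact absurd ((PySem.List.max?_eq_none_iff _ _).mp hmax) hvsne
        | some m =>
          have hmem : m ∈ lista.map pvFuerza := PySem.List.max?_mem hmax
          have hsome : (PySem.List.index? (lista.map pvFuerza) m).isSome :=
            (PySem.List.index?_isSome_iff _ _).mpr hmem
          obtain ⟨k, hk⟩ := Option.isSome_iff_exists.mp hsome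
          have hext : ∀ y ∈ (v :: t), ¬ cGT y m := by
            intro y hy
            have := PySem.List.max?_isMax hmax y (hvt ▸ hy)
            simp only [cGT, decide_eq_true_eq]
            omega
          simp only [show (("desc" : String) = "asc") = False from by simp, if_false,
            ← pvGetD_map_fuerza, ite_cGT, hlen, hvt]
          have hk' : PySem.List.index? (v :: t) m = some k := hvt ▸ hk
          rw [if_neg (by simp : ¬(("desc" : String) ≠ "asc" ∧ ("desc" : String) ≠ "desc")), hk']
          exact main_branch cGT cGT_hc cGT_hasym cGT_htot v t m hext k hk'
      · -- invalid min_max: both sides return 0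
        rw [if_pos ⟨ha, hd⟩]
        have : ∀ (l : List Int) (z : Int),
            l.foldl (fun (acc : Int) (_ : Int) => acc) z = z := by
          intro l
          induction l with
          | nil => intro z; rfl
          | cons x xs ih => intro z; exact ih z
        simp only [if_neg ha, if_neg hd]
        exact this _ 0
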